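-- pv_equiv track=rewrite | github.com/BonomoJoaoPaulo/Beecrowd_problems | Python/3300-3399/uri3358.py | nome_dificil
-- ===== SOURCE A (Python) =====
-- def nome_dificil(nome):
--     vogais = ['a','e','i','o','u']
--     count = 0
--     for car in nome.lower():
--         if count == 3:
--             return True
--         if car not in vogais:
--             count += 1
--         else:
--             count = 0
--     if count == 3:
--         return True
--     else:
--         return False
-- ===== SOURCE B (Python) =====
-- def nome_dificil(nome):
--     # group-then-measure: split the lowercased name into maximal non-vowel runs,
--     # then check whether any run has length >= 3
--     parts = []
--     cur = ''
--     for c in nome.lower():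
--         if c in 'aeiou':
--             parts.append(cur)
--             cur = ''
--         else:
--             cur += c
--     parts.append(cur)
--     return any(len(p) >= 3 for p in parts)
-- ===== Notes on version B (the rewrite author's own statement) =====
-- stated objective: alternative
-- what changed: Replaces the running consonant counter with early return by a group-then-measure pass: split the lowercased name into maximal non-vowel runs, then check whether any run has length >= 3.
import Mathlib
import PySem

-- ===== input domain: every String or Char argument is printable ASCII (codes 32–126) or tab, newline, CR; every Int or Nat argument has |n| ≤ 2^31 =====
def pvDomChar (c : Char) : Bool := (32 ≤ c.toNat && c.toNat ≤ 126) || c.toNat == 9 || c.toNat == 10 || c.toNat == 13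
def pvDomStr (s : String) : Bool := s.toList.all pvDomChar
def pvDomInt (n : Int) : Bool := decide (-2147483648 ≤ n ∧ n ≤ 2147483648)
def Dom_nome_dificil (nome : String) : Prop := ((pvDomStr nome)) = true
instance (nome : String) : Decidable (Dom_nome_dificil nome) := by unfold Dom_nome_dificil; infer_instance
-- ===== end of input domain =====

-- B replaces A's running counter with a group-then-measure pass (split into maximal
-- non-vowel runs, then test run lengths); same O(n) cost, different decomposition.

-- ===== PORT A =====
def pvVogais : List Char := ['a', 'e', 'i', 'o', 'u']

-- A's for-loop with its early returns, step for step
def pvLoopA : List Char → Int → Bool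
  | [], count => count == 3
  | car :: rest, count =>
    if count == 3 then true
    else if car ∉ pvVogais then pvLoopA rest (count + 1)
    else pvLoopA rest 0

def nome_dificil (nome : String) : Bool :=
  pvLoopA (PySem.Str.lower nome).toList 0

-- ===== PORT B =====
-- 'c in "aeiou"'
def pvIsVowel (c : Char) : Bool := c ∈ ['a', 'e', 'i', 'o', 'u']

-- one loop step of B: on a vowel, close the current run; otherwise extend it
def pvAltStep (st : List (List Char) × List Char) (c : Char) : List (List Char) × List Char :=
  if pvIsVowel c then (st.1 ++ [st.2], []) else (st.1, st.2 ++ [c])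

def nome_dificil_alt (nome : String) : Bool :=
  let st := ((PySem.Str.lower nome).toList).foldl pvAltStep ([], [])
  (st.1 ++ [st.2]).any (fun p => decide (3 ≤ p.length))

-- ===== PRECONDITION & SPEC =====
def Spec_nome_dificil (nome : String) (out : Bool) : Prop := out = nome_dificil_alt nome
instance (nome : String) (out : Bool) : Decidable (Spec_nome_dificil nome out) := by unfold Spec_nome_dificil; infer_instance

-- ===== CLAIM (what is proved, stated in full; the proofs are below) =====
def Claim_equal_nome_dificil : Prop := ∀ (nome : String), Dom_nome_dificil nome → Spec_nome_dificil nome (nome_dificil nome)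

-- ===== LEMMAS AND PROOFS =====

-- proof-side characterisation of B's grouping: the list of maximal non-vowel runs
def pvRuns : List Char → List Char → List (List Char)
  | [], cur => [cur]
  | c :: rest, cur => if pvIsVowel c then cur :: pvRuns rest [] else pvRuns rest (cur ++ [c])

theorem pvFoldl_runs : ∀ (l : List Char) (parts : List (List Char)) (cur : List Char),
    (l.foldl pvAltStep (parts, cur)).1 ++ [(l.foldl pvAltStep (parts, cur)).2]
      = parts ++ pvRuns l cur := by
  intro l
  induction l with
  | nil => intro parts cur; simp [pvRuns]
  | cons c rest ih =>
    intro parts cur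
    by_cases h : pvIsVowel c
    · simp [List.foldl, pvAltStep, h, pvRuns, ih]
    · simp [List.foldl, pvAltStep, h, pvRuns, ih]

theorem pvRuns_head : ∀ (l : List Char) (cur : List Char),
    ∃ p t, pvRuns l cur = (cur ++ p) :: t := by
  intro l
  induction l with
  | nil => intro cur; exact ⟨[], [], by simp [pvRuns]⟩
  | cons c rest ih =>
    intro cur
    by_cases h : pvIsVowel c
    · exact ⟨[], pvRuns rest [], by simp [pvRuns, h]⟩
    · obtain ⟨p, t, hp⟩ := ih (cur ++ [c])
      exact ⟨[c] ++ p, t, by simp [pvRuns, h, hp]⟩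

theorem pvLoopA_runs : ∀ (l : List Char) (cur : List Char), cur.length ≤ 3 →
    pvLoopA l (cur.length : Int) = (pvRuns l cur).any (fun p => decide (3 ≤ p.length)) := by
  intro l
  induction l with
  | nil =>
    intro cur hle
    simp only [pvLoopA, pvRuns, List.any_cons, List.any_nil, Bool.or_false]
    by_cases h : cur.length = 3
    · simp [h]
    · have : ¬ (3 ≤ cur.length) := by omega
      simp [this, h]
      omega
  | cons c rest ih =>
    intro cur hle
    by_cases h3 : cur.length = 3
    · -- A returns early; B's first run extends cur, so it is long enough
      obtain ⟨p, t, hp⟩ := pvRuns_head (c :: rest) cur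
      have : pvLoopA (c :: rest) (cur.length : Int) = true := by
        simp [pvLoopA, h3]
      rw [this, hp]
      simp [List.any_cons]
      left; omega
    · have hc3 : ¬ ((cur.length : Int) == 3) = true := by
        simp; omega
      by_cases hv : pvIsVowel c
      · have hmem : c ∈ pvVogais := by
          simpa [pvIsVowel, pvVogais] using hv
        have : pvLoopA (c :: rest) (cur.length : Int) = pvLoopA rest 0 := by
          simp [pvLoopA, hc3, hmem]
        rw [this, pvRuns]
        simp only [hv, if_pos, List.any_cons]
        have hcur : ¬ (3 ≤ cur.length) := by omega
        have h0 := ih ([] : List Char) (by simp)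
        simp at h0
        simp [hcur, h0]
      · have hmem : c ∉ pvVogais := by
          simpa [pvIsVowel, pvVogais] using hv
        have hstep : pvLoopA (c :: rest) (cur.length : Int) = pvLoopA rest ((cur.length : Int) + 1) := by
          simp [pvLoopA, hc3, hmem]
        have hlen : ((cur ++ [c]).length : Int) = (cur.length : Int) + 1 := by
          simp
        have hle' : (cur ++ [c]).length ≤ 3 := by simp; omega
        rw [hstep, ← hlen, ih (cur ++ [c]) hle']
        simp [pvRuns, hv]

-- ===== VERDICT (by name: the statement is the Claim_ definition above) =====
theorem nome_dificil_spec : Claim_equal_nome_dificil := by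
  intro nome _
  unfold Spec_nome_dificil nome_dificil nome_dificil_alt
  have h := pvLoopA_runs (PySem.Str.lower nome).toList [] (by simp)
  simp only [List.length_nil, Int.natCast_zero] at h
  rw [h]
  have hf := pvFoldl_runs (PySem.Str.lower nome).toList [] []
  simp only [List.nil_append] at hf
  simp only [← hf]
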